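-- pv_equiv track=rewrite | github.com/MaxBotta/Vertiefung_Programmierung | BenoteteAufgabe1/Teilaufgabe2.py | get_range_list
-- ===== SOURCE A (Python) =====
-- def get_range(d, header):
--     # Variable, die den Längenwert enthält.
--     result = 0
--     # Variable, die den längsten String enthält
--     string = ""
--     # Durchsuche alle Einträge der Liste
--     for item in d:
--         # Falls der Eintrag im gewählten Feldnamen länger als der aktuelle Wert
--         # in der Variable result ist, wird diese überschrieben.
--         if len(item[header]) > result:
--             result = len(item[header]) + 4
--             string = item[header]
--     # Falls der Feldname selbst der längste String ist, wird dessen Länge in result gespeichert.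
--     if len(header) > result:
--         result = len(header) + 4
--         string = header
--     return result, string
--
-- def get_range_list(d):
--     result_dict = {}
--     for key in d[0]:
--         if get_range(d, key)[0] >= 14:
--             result_dict[key] = get_range(d, key)[0]
--         else:
--             result_dict[key] = 14
--     return result_dict
-- ===== SOURCE B (Python) =====
-- def get_range_list(d):
--     # One transposed pass: per-key running widths maintained in a list parallel
--     # to the keys of d[0], instead of re-scanning all rows twice per key.
--     keys = list(d[0])
--     running = [0] * len(keys)
--     for item in d:
--         running = [len(item[k]) + 4 if len(item[k]) > r else r
--                    for k, r in zip(keys, running)]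
--     result = {}
--     for k, r in zip(keys, running):
--         if len(k) > r:
--             r = len(k) + 4
--         result[k] = r if r >= 14 else 14
--     return result
-- ===== Notes on version B (the rewrite author's own statement) =====
-- stated objective: alternative
-- what changed: Replaces A's per-key double scan (get_range called twice per key, each re-scanning all rows) with a single transposed pass over the rows that maintains a parallel list of running widths per key of d[0], then applies the header and minimum-14 rules once per key.
-- outside the precondition, e.g. on get_range_list([]): A raises IndexError, B raises IndexError
import Mathlib
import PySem

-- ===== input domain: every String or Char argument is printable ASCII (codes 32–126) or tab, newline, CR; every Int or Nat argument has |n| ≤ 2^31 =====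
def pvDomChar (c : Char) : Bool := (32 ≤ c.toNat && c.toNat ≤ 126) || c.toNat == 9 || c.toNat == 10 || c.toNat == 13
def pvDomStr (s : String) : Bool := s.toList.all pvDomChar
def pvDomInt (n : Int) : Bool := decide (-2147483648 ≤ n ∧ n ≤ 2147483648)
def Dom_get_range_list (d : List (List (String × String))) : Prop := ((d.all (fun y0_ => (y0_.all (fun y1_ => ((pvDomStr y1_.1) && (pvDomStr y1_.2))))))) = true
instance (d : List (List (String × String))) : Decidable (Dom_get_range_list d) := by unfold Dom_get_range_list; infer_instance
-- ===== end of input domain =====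

-- B replaces A's repeated per-key double scan (get_range called twice per key, each scanning
-- all rows) with one transposed pass over the rows maintaining a parallel list of running
-- widths, keeping A's exact update rule; objective: an alternative single-pass decomposition.


-- ===== PORT A =====
-- literal port of get_range: scan all rows for the longest entry under `header`
-- (item[header] with a missing key raises KeyError in Python; Pre_ excludes that,
-- so the total getD with default "" is exact on admitted inputs)
def get_range (d : List (List (String × String))) (header : String) : Int × String :=
  let p := d.foldl (fun (acc : Int × String) item =>
    let s := (PySem.Dict.mk item).getD header ""
    if PySem.Str.len s > acc.1 then (PySem.Str.len s + 4, s) else acc) (0, "")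
  if PySem.Str.len header > p.1 then (PySem.Str.len header + 4, header) else p

-- d[0] raises IndexError on empty d in Python; Pre_ excludes d = []
def get_range_list (d : List (List (String × String))) : List (String × Int) :=
  let first := (PySem.List.pyGet? d 0).getD []
  let rd := first.foldl (fun (rd : PySem.Dict String Int) kv =>
      if (get_range d kv.1).1 ≥ 14 then rd.insert kv.1 (get_range d kv.1).1
      else rd.insert kv.1 14) PySem.Dict.empty
  rd.items

-- ===== PORT B =====
def get_range_list_alt (d : List (List (String × String))) : List (String × Int) :=
  let first := (PySem.List.pyGet? d 0).getD []
  let keys := first.map Prod.fst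
  let running := d.foldl (fun (run : List Int) item =>
      (keys.zip run).map (fun kr =>
        let v := PySem.Str.len ((PySem.Dict.mk item).getD kr.1 "")
        if v > kr.2 then v + 4 else kr.2))
    (keys.map (fun _ => (0 : Int)))
  let out := (keys.zip running).foldl (fun (od : PySem.Dict String Int) kr =>
      let r := if PySem.Str.len kr.1 > kr.2 then PySem.Str.len kr.1 + 4 else kr.2
      od.insert kr.1 (if r ≥ 14 then r else 14)) PySem.Dict.empty
  out.items

-- ===== PRECONDITION & SPEC =====
-- Pre_ excludes the inputs where Python A raises: d = [] (IndexError on d[0]) and rows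
-- missing a key of d[0] (KeyError); it also excludes rows whose association list carries
-- a duplicate key, because such a list does not represent any Python dict.
def Pre_get_range_list (d : List (List (String × String))) : Prop :=
  d ≠ [] ∧ (∀ row ∈ d, (row.map Prod.fst).Nodup) ∧
    (∀ row ∈ d, ∀ kv ∈ d.headD [], ((PySem.Dict.mk row).get? kv.1).isSome)
instance (d : List (List (String × String))) : Decidable (Pre_get_range_list d) := by
  unfold Pre_get_range_list; infer_instance

def pvWitness_get_range_list : (List (List (String × String))) :=
  [[("id", "1"), ("name", "Anna")], [("id", "2"), ("name", "Bartholomew")]]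

def Spec_get_range_list (d : List (List (String × String))) (out : List (String × Int)) : Prop := out = get_range_list_alt d
instance (d : List (List (String × String))) (out : List (String × Int)) : Decidable (Spec_get_range_list d out) := by unfold Spec_get_range_list; infer_instance

-- ===== CLAIM (what is proved, stated in full; the proofs are below) =====
def Claim_equal_get_range_list : Prop := ∀ (d : List (List (String × String))), Dom_get_range_list d → Pre_get_range_list d → Spec_get_range_list d (get_range_list d)

-- ===== LEMMAS AND PROOFS =====

-- fst of A's pair-valued fold is the scalar fold (the carried string never feeds back)
theorem fst_get_range_fold (d : List (List (String × String))) (k : String) :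
    ∀ r s, (d.foldl (fun (acc : Int × String) item =>
        let t := (PySem.Dict.mk item).getD k ""
        if PySem.Str.len t > acc.1 then (PySem.Str.len t + 4, t) else acc) (r, s)).1
      = d.foldl (fun r item =>
        let v := PySem.Str.len ((PySem.Dict.mk item).getD k "")
        if v > r then v + 4 else r) r := by
  induction d with
  | nil => intro r s; rfl
  | cons item d ih =>
      intro r s
      simp only [List.foldl_cons]
      split_ifs <;> exact ih _ _

-- B's transposed row pass computes, per key, exactly the scalar column scan
theorem running_eq_map_colScan (keys : List String) (d : List (List (String × String))) :
    ∀ f : String → Int,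
      d.foldl (fun (run : List Int) item =>
          (keys.zip run).map (fun kr =>
            let v := PySem.Str.len ((PySem.Dict.mk item).getD kr.1 "")
            if v > kr.2 then v + 4 else kr.2)) (keys.map f)
      = keys.map (fun k => d.foldl (fun r item =>
          let v := PySem.Str.len ((PySem.Dict.mk item).getD k "")
          if v > r then v + 4 else r) (f k)) := by
  induction d with
  | nil => intro f; rfl
  | cons item d ih =>
      intro f
      simp only [List.foldl_cons]
      rw [← List.map_prod_left_eq_zip, List.map_map]
      have := ih (fun k =>
        let v := PySem.Str.len ((PySem.Dict.mk item).getD k "")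
        if v > f k then v + 4 else f k)
      simpa using this

theorem get_range_list_eq (d : List (List (String × String))) :
    get_range_list d = get_range_list_alt d := by
  simp only [get_range_list, get_range_list_alt]
  rw [running_eq_map_colScan (((PySem.List.pyGet? d 0).getD []).map Prod.fst) d (fun _ => 0)]
  rw [← List.map_prod_left_eq_zip, List.map_map, List.foldl_map]
  congr 1
  apply PySem.List.foldl_congr_mem
  intro acc kv _
  simp only [Function.comp, get_range, apply_ite Prod.fst, fst_get_range_fold]
  split_ifs <;> rfl

-- ===== VERDICT (by name: the statement is the Claim_ definition above) =====
theorem get_range_list_spec : Claim_equal_get_range_list := by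
  intro d _ _
  exact get_range_list_eq d
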